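-- pv_equiv track=rewrite | github.com/elkhaligy/LeetCode | 2. Medium/(11) Nov 2024/Week 1/4. 2542. Maximum Subsequence Score/2542. Maximum Subsequence Score.py | maxScore_TLE
-- ===== SOURCE A (Python) =====
-- def maxScore_TLE(nums1: list[int], nums2: list[int], k: int) -> int:
--     pairs = list(zip(nums1, nums2))
--     pairs.sort(key=lambda a: a[1], reverse=True)
--     ans = 0
--     sum_list = []
--     for a, b in pairs:
--         sum_list.append(a)
--         if len(sum_list) > k:
--             sum_list.remove(min(sum_list))
--         if len(sum_list) == k:
--             cur_sum = sum(sum_list)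
--             ans = max(ans, cur_sum * b)
--
--
--
--     return ans
-- ===== SOURCE B (Python) =====
-- def maxScore_TLE(nums1: list[int], nums2: list[int], k: int) -> int:
--     pairs = sorted(zip(nums1, nums2), key=lambda p: p[1], reverse=True)
--     best = 0
--     for i, (_, b) in enumerate(pairs):
--         top = sorted([x for x, _ in pairs[:i + 1]], reverse=True)[:k]
--         if len(top) == k:
--             best = max(best, sum(top) * b)
--     return best
-- ===== Notes on version B (the rewrite author's own statement) =====
-- stated objective: alternative
-- what changed: A sweeps the sorted pairs maintaining a running k-window by append/min-scan/remove and re-summing it; B keeps no window at all: for each index it independently recomputes the k best values of the prefix by sorting the prefix slice and takes the max of the per-index candidates.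
import Mathlib
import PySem

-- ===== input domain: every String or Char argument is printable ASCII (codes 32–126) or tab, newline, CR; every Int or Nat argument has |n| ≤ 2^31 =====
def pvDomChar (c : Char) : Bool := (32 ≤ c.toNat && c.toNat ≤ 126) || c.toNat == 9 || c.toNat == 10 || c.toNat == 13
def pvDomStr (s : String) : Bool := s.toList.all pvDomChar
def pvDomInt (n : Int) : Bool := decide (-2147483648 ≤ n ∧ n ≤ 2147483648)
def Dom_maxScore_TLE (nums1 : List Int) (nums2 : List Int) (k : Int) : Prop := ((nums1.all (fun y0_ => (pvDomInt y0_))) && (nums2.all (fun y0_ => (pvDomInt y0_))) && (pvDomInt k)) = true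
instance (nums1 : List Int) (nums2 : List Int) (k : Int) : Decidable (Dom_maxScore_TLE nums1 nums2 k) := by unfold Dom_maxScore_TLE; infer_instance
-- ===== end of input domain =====

-- B drops A's maintained running window (append / min-scan / remove / re-sum) and instead
-- recomputes each per-index candidate independently from a sorted prefix slice (objective:
-- alternative decomposition, not faster).

-- ===== PORT A =====
-- loop body of A: append, remove first min if size exceeds k, take sum*b if size is exactly k
def stepA (k : Int) (st : Int × List Int) (p : Int × Int) : Int × List Int :=
  let sl := st.2 ++ [p.1]
  let sl := if (sl.length : Int) > k then
      match PySem.List.min? sl (fun x => x) with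
      | some m => (PySem.List.remove? sl m).getD sl
      | none => sl
    else sl
  let ans := if (sl.length : Int) = k then max st.1 (sl.sum * p.2) else st.1
  (ans, sl)

def maxScore_TLE (nums1 : List Int) (nums2 : List Int) (k : Int) : Int :=
  let pairs := PySem.List.sorted (nums1.zip nums2) (fun a => a.2) true
  (pairs.foldl (stepA k) ((0 : Int), ([] : List Int))).1

-- ===== PORT B =====
-- loop body of B: from the prefix slice pairs[:i+1], sort its first components descending,
-- slice off the first k, and if that has exactly k elements take its sum times b
def bodyB (k : Int) (pairs : List (Int × Int)) (best : Int) (ip : Int × (Int × Int)) : Int :=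
  let top := PySem.List.slice
    (PySem.List.sorted ((PySem.List.slice pairs none (some (ip.1 + 1))).map Prod.fst) (fun x => x) true)
    none (some k)
  if (top.length : Int) = k then max best (top.sum * ip.2.2) else best

def maxScore_TLE_alt (nums1 : List Int) (nums2 : List Int) (k : Int) : Int :=
  let pairs := PySem.List.sorted (nums1.zip nums2) (fun p => p.2) true
  (PySem.List.enumerate pairs 0).foldl (bodyB k pairs) 0

-- ===== PRECONDITION & SPEC =====
def Spec_maxScore_TLE (nums1 : List Int) (nums2 : List Int) (k : Int) (out : Int) : Prop := out = maxScore_TLE_alt nums1 nums2 k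
instance (nums1 : List Int) (nums2 : List Int) (k : Int) (out : Int) : Decidable (Spec_maxScore_TLE nums1 nums2 k out) := by unfold Spec_maxScore_TLE; infer_instance

-- ===== CLAIM (what is proved, stated in full; the proofs are below) =====
def Claim_equal_maxScore_TLE : Prop := ∀ (nums1 : List Int) (nums2 : List Int) (k : Int), Dom_maxScore_TLE nums1 nums2 k → Spec_maxScore_TLE nums1 nums2 k (maxScore_TLE nums1 nums2 k)

-- ===== LEMMAS AND PROOFS =====

-- sorted descending (Python sorted(..., reverse=True)) on Int with identity key
def SDi (l : List Int) : List Int := PySem.List.sorted l (fun x => x) true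

-- the multiset of the K largest elements of l, as the first K of the descending sort
def topk (K : Nat) (l : List Int) : List Int := (SDi l).take K

theorem SDi_pairwise (l : List Int) : (SDi l).Pairwise (fun a b => b ≤ a) := by
  simpa using PySem.List.sorted_pairwise_rev l (fun x => x)

theorem SDi_perm (l : List Int) : (SDi l).Perm l := PySem.List.sorted_perm l _ _

theorem desc_eq {l₁ l₂ : List Int} (hp : l₁.Perm l₂)
    (h₁ : l₁.Pairwise (fun a b => b ≤ a)) (h₂ : l₂.Pairwise (fun a b => b ≤ a)) : l₁ = l₂ :=
  List.Perm.eq_of_pairwise (fun _ _ _ _ hab hba => le_antisymm hba hab) h₁ h₂ hp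

theorem SDi_append_singleton (l : List Int) (a : Int) :
    SDi (l ++ [a]) = List.orderedInsert (fun x y : Int => y ≤ x) a (SDi l) := by
  apply desc_eq
  · exact ((SDi_perm _).trans (List.perm_append_singleton a l)).trans
      (((SDi_perm l).symm.cons a).trans (List.perm_orderedInsert _ a (SDi l)).symm)
  · exact SDi_pairwise _
  · exact @List.Pairwise.orderedInsert _ (fun x y : Int => y ≤ x) _
      ⟨fun x y => le_total y x⟩ ⟨fun _ _ _ h1 h2 => le_trans h2 h1⟩ a (SDi l) (SDi_pairwise l)

-- last element of a descending-sorted list bounds it below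
theorem last_le_all {u : List Int} {z : Int} (h : (u ++ [z]).Pairwise (fun a b => b ≤ a)) :
    ∀ y ∈ u ++ [z], z ≤ y := by
  intro y hy
  rcases List.mem_append.mp hy with hy | hy
  · exact (List.pairwise_append.mp h).2.2 y hy z (by simp)
  · simp at hy; simp [hy]

-- CORE: appending a to the K-window and erasing the minimum is the K-window of the inserted list
theorem step_core (a : Int) : ∀ (s : List Int) (K : Nat),
    s.Pairwise (fun x y => y ≤ x) → K ≤ s.length →
    ∀ m, m ∈ s.take K ++ [a] → (∀ y ∈ s.take K ++ [a], m ≤ y) →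
    ((s.take K ++ [a]).erase m).Perm ((List.orderedInsert (fun x y : Int => y ≤ x) a s).take K) := by
  intro s
  induction s with
  | nil =>
    intro K _ hK m hm _
    have hK0 : K = 0 := by simpa using hK
    subst hK0
    have hma : m = a := by simpa using hm
    simp [hma]
  | cons x s' ih =>
    intro K hp hK m hm hmin
    cases K with
    | zero =>
      have hma : m = a := by simpa using hm
      simp [hma]
    | succ K' =>
      have hps' : s'.Pairwise (fun x y => y ≤ x) := (List.pairwise_cons.mp hp).2
      by_cases hxa : x ≤ a
      · -- a inserted at the front: window = a :: take K' of (x :: s')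
        have hins : List.orderedInsert (fun x y : Int => y ≤ x) a (x :: s') = a :: x :: s' := by
          simp [List.orderedInsert, hxa]
        set t : List Int := x :: s' with ht
        have hK't : K' < t.length := by simpa using hK
        have htake : t.take (K' + 1) = t.take K' ++ [t[K']] := by
          rw [List.take_add_one]; simp [List.getElem?_eq_getElem hK't]
        have htp : (t.take (K' + 1)).Pairwise (fun a b => b ≤ a) :=
          hp.sublist (List.take_sublist _ _)
        have hlast : ∀ y ∈ t.take (K' + 1), t[K'] ≤ y := by
          rw [htake] at htp ⊢; exact last_le_all htp
        -- the minimum m equals the value t[K']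
        have hmem : t[K'] ∈ t.take (K' + 1) ++ [a] :=
          List.mem_append.mpr (Or.inl (by rw [htake]; exact List.mem_append.mpr (Or.inr (by simp))))
        have hm1 : m ≤ t[K'] := hmin _ hmem
        have hm2 : t[K'] ≤ m := by
          rcases List.mem_append.mp hm with hmp | hma
          · exact hlast m hmp
          · have hx0 : x ∈ t.take (K' + 1) := by simp [ht]
            have hKx : t[K'] ≤ x := hlast x hx0
            simp only [List.mem_singleton] at hma
            omega
        have hmval : m = t[K'] := le_antisymm hm1 hm2
        -- erase the minimum: the remaining multiset is a :: take K'
        have hperm1 : (t.take (K' + 1) ++ [a]).Perm (m :: (t.take K' ++ [a])) := by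
          rw [htake, ← hmval]
          rw [List.append_assoc]
          exact List.perm_middle
        have h2 := hperm1.erase m
        rw [List.erase_cons_head] at h2
        refine h2.trans ?_
        rw [hins]
        simp only [List.take_succ_cons]
        exact List.perm_append_singleton a (t.take K')
      · -- a inserted deeper: peel x and recurse
        have hins : List.orderedInsert (fun x y : Int => y ≤ x) a (x :: s') =
            x :: List.orderedInsert (fun x y : Int => y ≤ x) a s' := by
          simp [List.orderedInsert, hxa]
        have hma : m ≤ a := hmin a (by simp)
        have hmx : m ≠ x := by
          intro h; rw [h] at hma; exact hxa hma
        have hm' : m ∈ s'.take K' ++ [a] := by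
          rcases List.mem_append.mp hm with hmp | hma'
          · rcases List.mem_cons.mp (by simpa using hmp) with h | h
            · exact absurd h hmx
            · exact List.mem_append.mpr (Or.inl h)
          · exact List.mem_append.mpr (Or.inr hma')
        have hmin' : ∀ y ∈ s'.take K' ++ [a], m ≤ y := by
          intro y hy
          apply hmin
          rcases List.mem_append.mp hy with h | h
          · exact List.mem_append.mpr (Or.inl (by simp [h]))
          · exact List.mem_append.mpr (Or.inr h)
        have hK' : K' ≤ s'.length := by simpa using hK
        have hrec := ih K' hps' hK' m hm' hmin'
        rw [hins]
        simp only [List.take_succ_cons]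
        have herase : (x :: (s'.take K' ++ [a])).erase m = x :: ((s'.take K' ++ [a]).erase m) :=
          List.erase_cons_tail (by simp [hmx.symm])
        rw [List.cons_append, herase]
        exact hrec.cons x

-- B's per-index slice expression
def btop (k : Int) (pref : List Int) : List Int :=
  PySem.List.slice (SDi pref) none (some k)

theorem btop_nonneg {k : Int} (hk : 0 ≤ k) (pref : List Int) : btop k pref = topk k.toNat pref := by
  simp [btop, topk, PySem.List.slice_to _ hk]

theorem topk_length (K : Nat) (l : List Int) : (topk K l).length = min K l.length := by
  simp [topk, (SDi_perm l).length_eq]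

-- A's answer update, read off the definition
theorem stepA_fst (k ans : Int) (sl : List Int) (p : Int × Int) :
    (stepA k (ans, sl) p).1 =
      if (((stepA k (ans, sl) p).2.length : Int)) = k then
        max ans ((stepA k (ans, sl) p).2.sum * p.2)
      else ans := rfl

-- one A-step: the window stays the K largest of the prefix, and the answer update is B's candidate
theorem stepA_window (k : Int) (ans : Int) (sl : List Int) (pref : List Int) (p : Int × Int)
    (h : sl.Perm (topk k.toNat pref)) :
    (stepA k (ans, sl) p).2.Perm (topk k.toNat (pref ++ [p.1])) ∧
    (stepA k (ans, sl) p).1 =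
      (if ((btop k (pref ++ [p.1])).length : Int) = k then
        max ans ((btop k (pref ++ [p.1])).sum * p.2) else ans) := by
  obtain ⟨a, b⟩ := p
  have hlen : sl.length = min k.toNat pref.length := by
    rw [h.length_eq, topk_length]
  -- the updated window
  have hwin : (stepA k (ans, sl) (a, b)).2.Perm (topk k.toNat (pref ++ [a])) := by
    simp only [stepA]
    by_cases htrig : ((sl ++ [a]).length : Int) > k
    · -- removal branch
      simp only [if_pos htrig]
      have hne : sl ++ [a] ≠ [] := by simp
      obtain ⟨m, hm⟩ : ∃ m, PySem.List.min? (sl ++ [a]) (fun x => x) = some m := by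
        cases he : PySem.List.min? (sl ++ [a]) (fun x => x) with
        | none => exact absurd ((PySem.List.min?_eq_none_iff _ _).mp he) hne
        | some m => exact ⟨m, rfl⟩
      have hmmem : m ∈ sl ++ [a] := PySem.List.min?_mem hm
      have hmmin : ∀ y ∈ sl ++ [a], m ≤ y := fun y hy => PySem.List.min?_isMin hm y hy
      have hperm : (sl ++ [a]).Perm ((SDi pref).take k.toNat ++ [a]) :=
        List.Perm.append h (List.Perm.refl _)
      have hK : k.toNat ≤ (SDi pref).length := by
        rw [(SDi_perm pref).length_eq]
        simp only [List.length_append, List.length_singleton] at htrig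
        omega
      have hcore := step_core a (SDi pref) k.toNat (SDi_pairwise pref) hK m
        (hperm.mem_iff.mp hmmem) (fun y hy => hmmin y (hperm.mem_iff.mpr hy))
      rw [hm]
      show ((PySem.List.remove? (sl ++ [a]) m).getD (sl ++ [a])).Perm _
      rw [PySem.List.remove?_eq_some_erase _ m hmmem, Option.getD_some]
      refine ((hperm.erase m).trans hcore).trans ?_
      rw [topk, SDi_append_singleton]
    · -- no removal: the whole prefix still fits in the window
      simp only [if_neg htrig]
      have hsmall : pref.length + 1 ≤ k.toNat := by
        simp only [List.length_append, List.length_singleton, not_lt] at htrig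
        omega
      have h1 : topk k.toNat pref = SDi pref := by
        apply List.take_of_length_le
        rw [(SDi_perm pref).length_eq]; omega
      have h2 : topk k.toNat (pref ++ [a]) = SDi (pref ++ [a]) := by
        apply List.take_of_length_le
        rw [(SDi_perm _).length_eq]; simp; omega
      rw [h2]
      refine (List.Perm.append h (List.Perm.refl [a])).trans ?_
      rw [h1]
      exact (List.Perm.append (SDi_perm pref) (List.Perm.refl _)).trans (SDi_perm _).symm
  refine ⟨hwin, ?_⟩
  -- the answer update
  by_cases hk : 0 ≤ k
  · rw [btop_nonneg hk, stepA_fst, hwin.length_eq, hwin.sum_eq]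
  · -- k < 0: neither side's length test can hold
    rw [stepA_fst]
    rw [if_neg, if_neg]
    · intro hc
      have := Int.natCast_nonneg ((btop k (pref ++ [a])).length)
      omega
    · intro hc
      have := Int.natCast_nonneg ((stepA k (ans, sl) (a, b)).2.length)
      omega

-- the folds agree, generalized over the processed prefix
theorem main_fold (k : Int) (pairs : List (Int × Int)) :
    ∀ (rest done : List (Int × Int)) (best : Int) (sl : List Int),
    pairs = done ++ rest → sl.Perm (topk k.toNat (done.map Prod.fst)) →
    (rest.foldl (stepA k) (best, sl)).1 =
      (PySem.List.enumerate rest (done.length : Int)).foldl (bodyB k pairs) best := by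
  intro rest
  induction rest with
  | nil => intro done best sl _ _; simp [PySem.List.enumerate]
  | cons p rest' ih =>
    intro done best sl hpairs hsl
    obtain ⟨a, b⟩ := p
    rw [PySem.List.enumerate_cons]
    simp only [List.foldl_cons]
    have hslice : PySem.List.slice pairs none (some ((done.length : Int) + 1)) = done ++ [(a, b)] := by
      rw [PySem.List.slice_to _ (by positivity)]
      have hn : ((done.length : Int) + 1).toNat = done.length + 1 := by omega
      rw [hn, hpairs, List.take_append]
      simp
    have hbody : bodyB k pairs best ((done.length : Int), (a, b)) =
        (if ((btop k ((done.map Prod.fst) ++ [a])).length : Int) = k then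
          max best ((btop k ((done.map Prod.fst) ++ [a])).sum * b) else best) := by
      simp only [bodyB, btop, hslice, SDi]
      simp [List.map_append]
    obtain ⟨hwin, hans⟩ := stepA_window k best sl (done.map Prod.fst) (a, b) hsl
    have hstep : stepA k (best, sl) (a, b) =
        ((stepA k (best, sl) (a, b)).1, (stepA k (best, sl) (a, b)).2) := rfl
    rw [hstep]
    have hih := ih (done ++ [(a, b)]) (stepA k (best, sl) (a, b)).1 (stepA k (best, sl) (a, b)).2
      (by rw [hpairs]; simp) (by simpa [List.map_append] using hwin)
    simp only [List.length_append, List.length_singleton] at hih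
    rw [hbody, ← hans]
    push_cast at hih
    exact hih

-- ===== VERDICT (by name: the statement is the Claim_ definition above) =====
theorem maxScore_TLE_spec : Claim_equal_maxScore_TLE := by
  intro nums1 nums2 k _
  unfold Spec_maxScore_TLE maxScore_TLE maxScore_TLE_alt
  exact main_fold k _ _ [] 0 [] rfl (by simp [topk, SDi, PySem.List.sorted])
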